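-- pv_equiv track=rewrite | github.com/Taskfree07/Offer-Letter-Compliance-Checker-Real-time- | python-nlp/docx_service.py | _add_inline_styles
-- ===== SOURCE A (Python) =====
-- def _add_inline_styles(html: str) -> str:
--     """Add inline styles to HTML elements for better rendering"""
--     # Add styles to common elements
--     style_replacements = {
--         '<p>': '<p style="margin: 0 0 10pt 0; line-height: 1.15; font-family: Calibri, Arial, sans-serif; font-size: 11pt;">',
--         '<h1>': '<h1 style="margin: 12pt 0 6pt 0; font-family: Calibri, Arial, sans-serif; font-size: 16pt; font-weight: bold;">',
--         '<h2>': '<h2 style="margin: 10pt 0 6pt 0; font-family: Calibri, Arial, sans-serif; font-size: 14pt; font-weight: bold;">',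
--         '<h3>': '<h3 style="margin: 10pt 0 6pt 0; font-family: Calibri, Arial, sans-serif; font-size: 12pt; font-weight: bold;">',
--         '<table>': '<table style="border-collapse: collapse; width: 100%; margin: 10pt 0; font-family: Calibri, Arial, sans-serif; font-size: 11pt;">',
--         '<td>': '<td style="border: 1px solid #000; padding: 5pt;">',
--         '<th>': '<th style="border: 1px solid #000; padding: 5pt; background: #f0f0f0; font-weight: bold;">',
--         '<ul>': '<ul style="margin: 5pt 0; padding-left: 30pt;">',
--         '<ol>': '<ol style="margin: 5pt 0; padding-left: 30pt;">',
--         '<li>': '<li style="margin: 3pt 0; line-height: 1.15;">',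
--     }
--
--     for old, new in style_replacements.items():
--         html = html.replace(old, new)
--
--     return html
-- ===== SOURCE B (Python) =====
-- _STYLES = [
--     ("p", "margin: 0 0 10pt 0; line-height: 1.15; font-family: Calibri, Arial, sans-serif; font-size: 11pt;"),
--     ("h1", "margin: 12pt 0 6pt 0; font-family: Calibri, Arial, sans-serif; font-size: 16pt; font-weight: bold;"),
--     ("h2", "margin: 10pt 0 6pt 0; font-family: Calibri, Arial, sans-serif; font-size: 14pt; font-weight: bold;"),
--     ("h3", "margin: 10pt 0 6pt 0; font-family: Calibri, Arial, sans-serif; font-size: 12pt; font-weight: bold;"),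
--     ("table", "border-collapse: collapse; width: 100%; margin: 10pt 0; font-family: Calibri, Arial, sans-serif; font-size: 11pt;"),
--     ("td", "border: 1px solid #000; padding: 5pt;"),
--     ("th", "border: 1px solid #000; padding: 5pt; background: #f0f0f0; font-weight: bold;"),
--     ("ul", "margin: 5pt 0; padding-left: 30pt;"),
--     ("ol", "margin: 5pt 0; padding-left: 30pt;"),
--     ("li", "margin: 3pt 0; line-height: 1.15;"),
-- ]
--
-- _RULES = [("<" + tag + ">", "<" + tag + ' style="' + style + '">') for tag, style in _STYLES]
--
--
-- def _add_inline_styles(html: str) -> str: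
--     """Add inline styles to HTML elements for better rendering"""
--     out = []
--     i = 0
--     n = len(html)
--     while i < n:
--         for key, styled in _RULES:
--             if html.startswith(key, i):
--                 out.append(styled)
--                 i += len(key)
--                 break
--         else:
--             out.append(html[i])
--             i += 1
--     return ''.join(out)
-- ===== Notes on version B (the rewrite author's own statement) =====
-- stated objective: alternative
-- what changed: A makes ten sequential full-string str.replace passes over a literal dict from bare tags to styled tags; B keeps a bare (tag, style) table, assembles each key and its styled form once, and rewrites the string in a single explicit left-to-right scan, emitting the first matching rule at each position or copying the character.
import Mathlib
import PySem

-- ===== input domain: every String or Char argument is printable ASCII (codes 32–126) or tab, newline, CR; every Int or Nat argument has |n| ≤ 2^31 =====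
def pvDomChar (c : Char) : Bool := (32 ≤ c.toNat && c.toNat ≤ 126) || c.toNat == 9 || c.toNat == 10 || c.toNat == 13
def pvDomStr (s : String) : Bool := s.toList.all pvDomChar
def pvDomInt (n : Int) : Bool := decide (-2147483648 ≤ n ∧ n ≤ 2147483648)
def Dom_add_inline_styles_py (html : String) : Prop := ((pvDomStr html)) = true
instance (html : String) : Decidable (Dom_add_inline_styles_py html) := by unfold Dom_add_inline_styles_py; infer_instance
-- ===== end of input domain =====

-- B replaces A's ten sequential full-string replace passes by a single left-to-right scan
-- over a (tag, style) table whose keys/replacements are assembled on the fly; objective: alternative.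


-- ===== PORT A =====
-- A's dict 'style_replacements': items() iterates in insertion order, i.e. exactly this list
def pvTags : List (String × String) :=
  [("<p>", "<p style=\"margin: 0 0 10pt 0; line-height: 1.15; font-family: Calibri, Arial, sans-serif; font-size: 11pt;\">"),
   ("<h1>", "<h1 style=\"margin: 12pt 0 6pt 0; font-family: Calibri, Arial, sans-serif; font-size: 16pt; font-weight: bold;\">"),
   ("<h2>", "<h2 style=\"margin: 10pt 0 6pt 0; font-family: Calibri, Arial, sans-serif; font-size: 14pt; font-weight: bold;\">"),
   ("<h3>", "<h3 style=\"margin: 10pt 0 6pt 0; font-family: Calibri, Arial, sans-serif; font-size: 12pt; font-weight: bold;\">"),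
   ("<table>", "<table style=\"border-collapse: collapse; width: 100%; margin: 10pt 0; font-family: Calibri, Arial, sans-serif; font-size: 11pt;\">"),
   ("<td>", "<td style=\"border: 1px solid #000; padding: 5pt;\">"),
   ("<th>", "<th style=\"border: 1px solid #000; padding: 5pt; background: #f0f0f0; font-weight: bold;\">"),
   ("<ul>", "<ul style=\"margin: 5pt 0; padding-left: 30pt;\">"),
   ("<ol>", "<ol style=\"margin: 5pt 0; padding-left: 30pt;\">"),
   ("<li>", "<li style=\"margin: 3pt 0; line-height: 1.15;\">")]

-- A: for old, new in style_replacements.items(): html = html.replace(old, new)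
def add_inline_styles_py (html : String) : String :=
  pvTags.foldl (fun h p => PySem.Str.replace h p.1 p.2) html

-- ===== PORT B =====
-- B's raw table _STYLES: bare tag names paired with their style bodies
def pvStyles : List (String × String) :=
  [("p", "margin: 0 0 10pt 0; line-height: 1.15; font-family: Calibri, Arial, sans-serif; font-size: 11pt;"),
   ("h1", "margin: 12pt 0 6pt 0; font-family: Calibri, Arial, sans-serif; font-size: 16pt; font-weight: bold;"),
   ("h2", "margin: 10pt 0 6pt 0; font-family: Calibri, Arial, sans-serif; font-size: 14pt; font-weight: bold;"),
   ("h3", "margin: 10pt 0 6pt 0; font-family: Calibri, Arial, sans-serif; font-size: 12pt; font-weight: bold;"),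
   ("table", "border-collapse: collapse; width: 100%; margin: 10pt 0; font-family: Calibri, Arial, sans-serif; font-size: 11pt;"),
   ("td", "border: 1px solid #000; padding: 5pt;"),
   ("th", "border: 1px solid #000; padding: 5pt; background: #f0f0f0; font-weight: bold;"),
   ("ul", "margin: 5pt 0; padding-left: 30pt;"),
   ("ol", "margin: 5pt 0; padding-left: 30pt;"),
   ("li", "margin: 3pt 0; line-height: 1.15;")]

-- B's _RULES comprehension: ("<"+tag+">", "<"+tag+" style=\""+style+"\">")
def pvRules : List (List Char × List Char) :=
  pvStyles.map (fun q =>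
    ('<' :: q.1.toList ++ ['>'],
     '<' :: q.1.toList ++ (" style=\"".toList ++ q.2.toList ++ "\">".toList)))

-- B's while-loop: at each position, the first rule whose key starts here (the inner
-- for/break) emits its styled tag and skips the key, otherwise the character is copied.
-- The Nat argument is fuel (= remaining length), a totality guard only.
def pvScan (rs : List (List Char × List Char)) : Nat → List Char → List Char
  | _, [] => []
  | 0, s => s
  | f+1, c :: t =>
    match rs.find? (fun r => r.1.isPrefixOf (c :: t)) with
    | some r => r.2 ++ pvScan rs f (List.drop r.1.length (c :: t))
    | none => c :: pvScan rs f t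

def add_inline_styles_py_alt (html : String) : String :=
  String.ofList (pvScan pvRules html.toList.length html.toList)

-- ===== PRECONDITION & SPEC =====
def Spec_add_inline_styles_py (html : String) (out : String) : Prop := out = add_inline_styles_py_alt html
instance (html : String) (out : String) : Decidable (Spec_add_inline_styles_py html out) := by unfold Spec_add_inline_styles_py; infer_instance

-- ===== CLAIM (what is proved, stated in full; the proofs are below) =====
def Claim_equal_add_inline_styles_py : Prop := ∀ (html : String), Dom_add_inline_styles_py html → Spec_add_inline_styles_py html (add_inline_styles_py html)

-- ===== LEMMAS AND PROOFS =====

-- A's table with both sides as character lists (proof-side view of pvTags)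
def pvTagsC : List (List Char × List Char) := pvTags.map (fun p => (p.1.toList, p.2.toList))

-- the one-pass scan at its natural fuel
def pvM (ps : List (List Char × List Char)) (s : List Char) : List Char :=
  pvScan ps s.length s

-- the structural conditions on the tag table that make ten sequential replaces
-- coincide with one simultaneous pass: every key and replacement starts with '<' and
-- contains no further '<'; no key is a prefix of any replacement (and is never longer
-- than one); keys are mutually non-prefix.
def pvGood (ps : List (List Char × List Char)) : Prop :=
  (∀ p ∈ ps, p.1.head? = some '<' ∧ '<' ∉ p.1.tail ∧ p.2.head? = some '<' ∧ '<' ∉ p.2.tail) ∧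
  (∀ p ∈ ps, ∀ q ∈ ps, ¬ p.1 <+: q.2 ∧ p.1.length ≤ q.2.length ∧ (p.1 <+: q.1 → p.1 = q.1))

lemma pvGood_tail {p : List Char × List Char} {ps : List (List Char × List Char)}
    (h : pvGood (p :: ps)) : pvGood ps :=
  ⟨fun q hq => h.1 q (List.mem_cons_of_mem _ hq),
   fun q hq r hr => h.2 q (List.mem_cons_of_mem _ hq) r (List.mem_cons_of_mem _ hr)⟩

lemma pvKey_ne_nil {l : List Char} (h : l.head? = some '<') : l ≠ [] := by
  cases l <;> simp_all

lemma pvScan_irrel (ps : List (List Char × List Char))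
    (hk : ∀ p ∈ ps, p.1 ≠ []) :
    ∀ (f f' : Nat) (s : List Char), s.length ≤ f → s.length ≤ f' →
      pvScan ps f s = pvScan ps f' s := by
  intro f
  induction f with
  | zero =>
    intro f' s h1 _
    have : s = [] := List.eq_nil_of_length_eq_zero (Nat.le_zero.mp h1)
    subst this; cases f' <;> rfl
  | succ f ih =>
    intro f' s h1 h2
    cases s with
    | nil => cases f' <;> rfl
    | cons c t =>
      cases f' with
      | zero => simp at h2
      | succ f' =>
        cases hfind : ps.find? (fun p => p.1.isPrefixOf (c :: t)) with
        | none =>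
          simp only [pvScan, hfind]
          have := ih f' t (by simpa using h1) (by simpa using h2)
          rw [this]
        | some q =>
          have hq : q ∈ ps := List.mem_of_find?_eq_some hfind
          have hpre : q.1 <+: (c :: t) := by
            have := List.find?_some hfind
            simpa [List.isPrefixOf_iff_prefix] using this
          have hlen : 1 ≤ q.1.length := by
            have := hk q hq
            cases hq1 : q.1 with
            | nil => exact absurd hq1 this
            | cons a b => simp
          have h1' : t.length + 1 ≤ f + 1 := by simpa using h1
          have h2' : t.length + 1 ≤ f' + 1 := by simpa using h2
          have hd : (List.drop q.1.length (c :: t)).length ≤ f := by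
            simp only [List.length_drop, List.length_cons]
            omega
          have hd' : (List.drop q.1.length (c :: t)).length ≤ f' := by
            simp only [List.length_drop, List.length_cons]
            omega
          simp only [pvScan, hfind]
          rw [ih f' _ hd hd']

lemma pvM_nil (ps : List (List Char × List Char)) : pvM ps [] = [] := rfl

lemma pvM_pos (ps : List (List Char × List Char)) (hk : ∀ p ∈ ps, p.1 ≠ [])
    {c : Char} {t : List Char} {q : List Char × List Char}
    (hfind : ps.find? (fun p => p.1.isPrefixOf (c :: t)) = some q) :
    pvM ps (c :: t) = q.2 ++ pvM ps (List.drop q.1.length (c :: t)) := by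
  have hq : q ∈ ps := List.mem_of_find?_eq_some hfind
  have hlen : 1 ≤ q.1.length := by
    have := hk q hq
    cases hq1 : q.1 with
    | nil => exact absurd hq1 this
    | cons a b => simp
  unfold pvM
  simp only [List.length_cons, pvScan, hfind]
  exact congrArg _ (pvScan_irrel ps hk _ _ _ (by simp only [List.length_drop, List.length_cons]; omega) le_rfl)

lemma pvM_neg (ps : List (List Char × List Char))
    {c : Char} {t : List Char}
    (hfind : ps.find? (fun p => p.1.isPrefixOf (c :: t)) = none) :
    pvM ps (c :: t) = c :: pvM ps t := by
  unfold pvM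
  simp only [List.length_cons, pvScan, hfind]

lemma pvM_id (s : List Char) : pvM [] s = s := by
  unfold pvM
  suffices h : ∀ f (s : List Char), s.length ≤ f → pvScan [] f s = s by
    exact h _ _ le_rfl
  intro f
  induction f with
  | zero => intro s h; have : s = [] := List.eq_nil_of_length_eq_zero (Nat.le_zero.mp h); subst this; rfl
  | succ f ih =>
    intro s h
    cases s with
    | nil => rfl
    | cons c t => simp only [pvScan, List.find?_nil]; rw [ih t (by simpa using h)]

lemma pvGo_eq (o n : List Char) :
    ∀ (f : Nat) (s acc : List Char),
      PySem.Chars.replace.go o n f s acc = acc.reverse ++ pvScan [(o, n)] f s := by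
  intro f
  induction f with
  | zero =>
    intro s acc
    cases s <;> simp [PySem.Chars.replace.go, pvScan]
  | succ f ih =>
    intro s acc
    cases s with
    | nil => simp [PySem.Chars.replace.go, pvScan]
    | cons c t =>
      simp only [PySem.Chars.replace.go]
      by_cases h : o.isPrefixOf (c :: t)
      · simp only [h, if_true, ih, pvScan, List.find?_cons, h]
        simp
      · simp only [h, if_false, ih, pvScan, List.find?_cons]
        simp [h]

lemma pvReplace_eq (s o n : List Char) (ho : o ≠ []) :
    PySem.Chars.replace s o n = pvM [(o, n)] s := by
  unfold PySem.Chars.replace pvM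
  rw [pvGo_eq]
  simp [List.isEmpty_iff, ho]

lemma pvHead_drop {l : List Char} {j : Nat} (h1 : 1 ≤ j) (h2 : j < l.length) :
    ∃ d, (l.drop j).head? = some d ∧ d ∈ l.tail := by
  refine ⟨l[j], ?_, ?_⟩
  · rw [List.head?_drop]
    simp [h2]
  · rw [← List.drop_one]
    have hj : j - 1 < (l.drop 1).length := by simp [List.length_drop]; omega
    have : (l.drop 1)[j-1] = l[j] := by
      rw [List.getElem_drop]
      congr 1
      omega
    rw [← this]
    exact List.getElem_mem hj

lemma pvM_append (ps : List (List Char × List Char)) (hk : ∀ p ∈ ps, p.1 ≠ []) :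
    ∀ (u X : List Char),
      (∀ j, j < u.length → ∀ p ∈ ps, ¬ p.1 <+: (u.drop j ++ X)) →
      pvM ps (u ++ X) = u ++ pvM ps X := by
  intro u
  induction u with
  | nil => intro X _; simp
  | cons d m ih =>
    intro X hcond
    have hfind : ps.find? (fun p => p.1.isPrefixOf (d :: m ++ X)) = none := by
      rw [List.find?_eq_none]
      intro p hp
      simp only [Bool.not_eq_true, List.isPrefixOf_iff_prefix, decide_eq_true_eq]
      intro hpre
      exact hcond 0 (by simp) p hp (by simpa using hpre)
    have hstep := pvM_neg (c := d) (t := m ++ X) ps hfind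
    rw [List.cons_append, hstep, ih X (fun j hj p hp => by
      have := hcond (j+1) (by simp; omega) p hp
      simpa using this)]
    simp

lemma pvPrefix_through (o n : List Char) (ho : o ≠ []) (hn : n.head? = some '<') :
    ∀ (t u : List Char), u <+: pvM [(o, n)] t → '<' ∉ u → u <+: t := by
  suffices H : ∀ (N : Nat) (t : List Char), t.length ≤ N → ∀ u, u <+: pvM [(o, n)] t → '<' ∉ u → u <+: t by
    intro t u h1 h2; exact H t.length t le_rfl u h1 h2
  intro N
  induction N with
  | zero =>
    intro t ht u h1 h2
    have : t = [] := List.eq_nil_of_length_eq_zero (Nat.le_zero.mp ht)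
    subst this
    rw [pvM_nil] at h1
    simpa using h1
  | succ N ih =>
    intro t ht u h1 h2
    cases t with
    | nil =>
      rw [pvM_nil] at h1
      simpa using h1
    | cons c t' =>
      have hk : ∀ p ∈ [(o, n)], p.1 ≠ [] := by simpa using ho
      by_cases hp : o <+: (c :: t')
      · have hfind : List.find? (fun p => p.1.isPrefixOf (c :: t')) [(o, n)] = some (o, n) := by
          have hb : (o.isPrefixOf (c :: t')) = true := List.isPrefixOf_iff_prefix.mpr hp
          rw [List.find?_cons]; simp only [hb]
        rw [pvM_pos _ hk hfind] at h1
        cases u with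
        | nil => exact List.nil_prefix
        | cons x u' =>
          exfalso
          obtain ⟨n', hn'⟩ : ∃ n', n = '<' :: n' := by
            cases n with
            | nil => simp at hn
            | cons a b => simp at hn; exact ⟨b, by rw [hn]⟩
          rw [hn'] at h1
          have : x = '<' := (List.cons_prefix_cons.mp h1).1
          exact h2 (by rw [this]; exact List.mem_cons_self)
      · have hfind : List.find? (fun p => p.1.isPrefixOf (c :: t')) [(o, n)] = none := by
          have hb : (o.isPrefixOf (c :: t')) = false :=
            Bool.eq_false_iff.mpr (fun h => hp (List.isPrefixOf_iff_prefix.mp h))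
          rw [List.find?_cons]; simp only [hb, List.find?_nil]
        rw [pvM_neg _ hfind] at h1
        cases u with
        | nil => exact List.nil_prefix
        | cons x u' =>
          obtain ⟨hx, hu'⟩ := List.cons_prefix_cons.mp h1
          subst hx
          have : u' <+: t' := ih t' (by simpa using ht) u' hu'
            (fun hm => h2 (List.mem_cons_of_mem _ hm))
          exact List.cons_prefix_cons.mpr ⟨rfl, this⟩

lemma pvNot_prefix_head {o u : List Char} {d : Char}
    (ho : o.head? = some '<') (hu : u.head? = some d) (hd : d ≠ '<') : ¬ o <+: u := by
  intro h
  cases o with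
  | nil => simp at ho
  | cons a o' =>
    cases u with
    | nil => simp at hu
    | cons b u' =>
      obtain ⟨hab, -⟩ := List.cons_prefix_cons.mp h
      simp only [List.head?_cons, Option.some.injEq] at ho hu
      exact hd (by rw [← hu, ← hab, ho])

lemma pvFind_transfer (ps : List (List Char × List Char))
    (hcomp : ∀ p ∈ ps, ∀ q ∈ ps, p.1 <+: q.1 → p.1 = q.1)
    {s : List Char} {q : List Char × List Char}
    (h : ps.find? (fun p => p.1.isPrefixOf s) = some q) (X : List Char) :
    ps.find? (fun p => p.1.isPrefixOf (q.1 ++ X)) = some q := by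
  rw [List.find?_eq_some_iff_append] at h ⊢
  obtain ⟨hq, as, bs, hsplit, hfail⟩ := h
  have hqs : q.1 <+: s := List.isPrefixOf_iff_prefix.mp hq
  refine ⟨List.isPrefixOf_iff_prefix.mpr (List.prefix_append _ _), as, bs, hsplit, ?_⟩
  intro a ha
  have haps : a ∈ ps := by rw [hsplit]; exact List.mem_append_left _ ha
  have hqps : q ∈ ps := by rw [hsplit]; exact List.mem_append_right _ (List.mem_cons_self)
  have hafail : ¬ a.1 <+: s := by
    have h0 := hfail a ha
    intro hc
    rw [List.isPrefixOf_iff_prefix.mpr hc] at h0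
    simp at h0
  rw [Bool.not_eq_eq_eq_not, Bool.not_true, Bool.eq_false_iff]
  intro hpre'
  have hpre : a.1 <+: q.1 ++ X := List.isPrefixOf_iff_prefix.mp hpre'
  rcases List.prefix_or_prefix_of_prefix hpre (List.prefix_append q.1 X) with h1 | h1
  · exact hafail (h1.trans hqs)
  · have := hcomp q hqps a haps h1
    exact hafail (this ▸ hqs)

lemma pvM_rep_comm (p : List Char × List Char) (ps : List (List Char × List Char))
    (hG : pvGood (p :: ps)) :
    ∀ s, pvM ps (pvM [p] s) = pvM (p :: ps) s := by
  have hmem : p ∈ p :: ps := List.mem_cons_self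
  obtain ⟨hp1h, hp1t, hp2h, hp2t⟩ := hG.1 p hmem
  have hp1ne : p.1 ≠ [] := pvKey_ne_nil hp1h
  have hkps : ∀ q ∈ ps, q.1 ≠ [] :=
    fun q hq => pvKey_ne_nil ((hG.1 q (List.mem_cons_of_mem _ hq)).1)
  have hkall : ∀ q ∈ p :: ps, q.1 ≠ [] := fun q hq => pvKey_ne_nil ((hG.1 q hq).1)
  have hk1 : ∀ q ∈ [p], q.1 ≠ [] := by simpa using hp1ne
  suffices H : ∀ (N : Nat) (s : List Char), s.length ≤ N →
      pvM ps (pvM [p] s) = pvM (p :: ps) s by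
    intro s; exact H s.length s le_rfl
  intro N
  induction N with
  | zero =>
    intro s hs
    have : s = [] := List.eq_nil_of_length_eq_zero (Nat.le_zero.mp hs)
    subst this; rw [pvM_nil, pvM_nil, pvM_nil]
  | succ N ih =>
    intro s hs
    cases s with
    | nil => rw [pvM_nil, pvM_nil, pvM_nil]
    | cons c t =>
      by_cases hp : p.1 <+: (c :: t)
      · -- the head key matches: both sides rewrite p
        have hb : (p.1.isPrefixOf (c :: t)) = true := List.isPrefixOf_iff_prefix.mpr hp
        have hfind1 : List.find? (fun r => r.1.isPrefixOf (c :: t)) [p] = some p := by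
          rw [List.find?_cons]; simp only [hb]
        have hfindA : List.find? (fun r => r.1.isPrefixOf (c :: t)) (p :: ps) = some p := by
          rw [List.find?_cons]; simp only [hb]
        rw [pvM_pos _ hk1 hfind1, pvM_pos _ hkall hfindA]
        set s₂ := List.drop p.1.length (c :: t) with hs₂
        have hlen2 : s₂.length ≤ N := by
          have : 1 ≤ p.1.length := by
            cases hq1 : p.1 with
            | nil => exact absurd hq1 hp1ne
            | cons a b => simp
          simp only [hs₂, List.length_drop, List.length_cons]
          simp only [List.length_cons] at hs
          omega
        rw [pvM_append ps hkps p.2 (pvM [p] s₂) ?_, ih s₂ hlen2]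
        -- no key of ps matches inside the replacement p.2
        intro j hj q hq
        rcases Nat.eq_zero_or_pos j with hj0 | hj1
        · subst hj0
          simp only [List.drop_zero]
          intro hpre
          have hq2 : q.1 <+: p.2 := by
            rcases List.prefix_or_prefix_of_prefix hpre (List.prefix_append p.2 _) with h1 | h1
            · exact h1
            · have hle : q.1.length ≤ p.2.length :=
                (hG.2 q (List.mem_cons_of_mem _ hq) p hmem).2.1
              have : p.2.length ≤ q.1.length := h1.length_le
              exact (List.IsPrefix.eq_of_length h1 (by omega)).symm ▸ List.prefix_refl _
          exact (hG.2 q (List.mem_cons_of_mem _ hq) p hmem).1 hq2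
        · obtain ⟨d, hd1, hd2⟩ := pvHead_drop hj1 hj
          have hdne : d ≠ '<' := fun hc => hp2t (hc ▸ hd2)
          have hhead : (List.drop j p.2 ++ pvM [p] s₂).head? = some d := by
            cases hdr : List.drop j p.2 with
            | nil => rw [hdr] at hd1; simp at hd1
            | cons e r => rw [hdr] at hd1; simpa using hd1
          exact pvNot_prefix_head ((hG.1 q (List.mem_cons_of_mem _ hq)).1) hhead hdne
      · cases hq : List.find? (fun r => r.1.isPrefixOf (c :: t)) ps with
        | some q =>
          -- a later key matches first
          have hqs : q.1 <+: (c :: t) := by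
            have := List.find?_some hq
            simpa [List.isPrefixOf_iff_prefix] using this
          have hqmem : q ∈ ps := List.mem_of_find?_eq_some hq
          obtain ⟨hq1h, hq1t, hq2h, hq2t⟩ := hG.1 q (List.mem_cons_of_mem _ hqmem)
          have hq1ne : q.1 ≠ [] := pvKey_ne_nil hq1h
          obtain ⟨s₂, hsplit⟩ := hqs
          have hcond : ∀ j, j < q.1.length → ∀ r ∈ [p], ¬ r.1 <+: (q.1.drop j ++ s₂) := by
            intro j hj r hr
            rcases List.mem_singleton.mp hr with rfl
            rcases Nat.eq_zero_or_pos j with hj0 | hj1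
            · subst hj0
              simpa [hsplit] using hp
            · obtain ⟨d, hd1, hd2⟩ := pvHead_drop hj1 hj
              have hdne : d ≠ '<' := fun hc => hq1t (hc ▸ hd2)
              have hhead : (List.drop j q.1 ++ s₂).head? = some d := by
                cases hdr : List.drop j q.1 with
                | nil => rw [hdr] at hd1; simp at hd1
                | cons e r' => rw [hdr] at hd1; simpa using hd1
              exact pvNot_prefix_head hp1h hhead hdne
          have hinner : pvM [p] (c :: t) = q.1 ++ pvM [p] s₂ := by
            rw [← hsplit]
            exact pvM_append [p] hk1 q.1 s₂ hcond
          have hcomp : ∀ r ∈ ps, ∀ r' ∈ ps, r.1 <+: r'.1 → r.1 = r'.1 :=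
            fun r hr r' hr' =>
              (hG.2 r (List.mem_cons_of_mem _ hr) r' (List.mem_cons_of_mem _ hr')).2.2
          set X := pvM [p] s₂ with hX
          have hfindT : List.find? (fun r => r.1.isPrefixOf (q.1 ++ X)) ps = some q :=
            pvFind_transfer ps hcomp hq X
          obtain ⟨a, qt, hq1eq⟩ : ∃ a qt, q.1 = a :: qt := by
            cases hq1 : q.1 with
            | nil => exact absurd hq1 hq1ne
            | cons a b => exact ⟨a, b, rfl⟩
          have hac : a = c := by
            have := hsplit
            rw [hq1eq] at this
            exact (List.cons.injEq .. ▸ this).1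
          have hlen2 : s₂.length ≤ N := by
            have := congrArg List.length hsplit
            simp only [List.length_append, List.length_cons] at this
            have h1 : 1 ≤ q.1.length := by rw [hq1eq]; simp
            simp only [List.length_cons] at hs
            omega
          have hstep : pvM ps (q.1 ++ X) = q.2 ++ pvM ps X := by
            have hshape : q.1 ++ X = c :: (qt ++ X) := by rw [hq1eq, hac]; simp
            rw [hshape] at hfindT ⊢
            rw [pvM_pos ps hkps hfindT, ← hshape]
            congr 1
            rw [List.drop_left]
          have hbF : (p.1.isPrefixOf (c :: t)) = false :=
            Bool.eq_false_iff.mpr (fun h => hp (List.isPrefixOf_iff_prefix.mp h))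
          have hfindA : List.find? (fun r => r.1.isPrefixOf (c :: t)) (p :: ps) = some q := by
            rw [List.find?_cons]; simp only [hbF]; exact hq
          rw [hinner, hstep, hX, ih s₂ hlen2, pvM_pos _ hkall hfindA]
          congr 1
          rw [← hsplit, List.drop_left]
        | none =>
          have hbF : (p.1.isPrefixOf (c :: t)) = false :=
            Bool.eq_false_iff.mpr (fun h => hp (List.isPrefixOf_iff_prefix.mp h))
          have hfind1 : List.find? (fun r => r.1.isPrefixOf (c :: t)) [p] = none := by
            rw [List.find?_cons]; simp only [hbF, List.find?_nil]
          have hfindA : List.find? (fun r => r.1.isPrefixOf (c :: t)) (p :: ps) = none := by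
            rw [List.find?_cons]; simp only [hbF]; exact hq
          have hinner : pvM [p] (c :: t) = c :: pvM [p] t := pvM_neg _ hfind1
          have hqnone : ∀ r ∈ ps, ¬ r.1 <+: (c :: t) := by
            intro r hr hc
            have := List.find?_eq_none.mp hq r hr
            exact this (List.isPrefixOf_iff_prefix.mpr hc)
          have houter : List.find? (fun r => r.1.isPrefixOf (c :: pvM [p] t)) ps = none := by
            rw [List.find?_eq_none]
            intro r hr
            intro hpre'
            have hpre : r.1 <+: c :: pvM [p] t := List.isPrefixOf_iff_prefix.mp hpre'
            obtain ⟨hr1h, hr1t, -, -⟩ := hG.1 r (List.mem_cons_of_mem _ hr)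
            obtain ⟨a, u, hru⟩ : ∃ a u, r.1 = a :: u := by
              cases hr1 : r.1 with
              | nil => exact absurd hr1 (pvKey_ne_nil hr1h)
              | cons a b => exact ⟨a, b, rfl⟩
            rw [hru] at hpre
            obtain ⟨hac, hu⟩ := List.cons_prefix_cons.mp hpre
            have hunotin : '<' ∉ u := by
              intro hc
              apply hr1t
              rw [hru]
              simpa using hc
            have hut : u <+: t := pvPrefix_through p.1 p.2 hp1ne hp2h t u hu hunotin
            exact hqnone r hr (by rw [hru, hac]; exact List.cons_prefix_cons.mpr ⟨rfl, hut⟩)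
          have hlt : t.length ≤ N := by simpa using hs
          rw [hinner, pvM_neg _ houter, ih t hlt, pvM_neg _ hfindA]

lemma pvFoldl_eq (ps : List (List Char × List Char)) (hG : pvGood ps) :
    ∀ s, ps.foldl (fun s q => PySem.Chars.replace s q.1 q.2) s = pvM ps s := by
  induction ps with
  | nil => intro s; rw [pvM_id]; rfl
  | cons p ps ih =>
    intro s
    have hp1ne : p.1 ≠ [] := pvKey_ne_nil (hG.1 p List.mem_cons_self).1
    rw [List.foldl_cons, ih (pvGood_tail hG), pvReplace_eq s p.1 p.2 hp1ne,
      pvM_rep_comm p ps hG s]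

-- B's assembled rules coincide, as lists of character lists, with A's literal table
set_option maxRecDepth 16384 in
lemma pvRules_eq_tags : pvRules = pvTagsC := by
  unfold pvRules pvStyles pvTagsC pvTags
  decide

set_option maxRecDepth 8192 in
lemma pvGood_tags : pvGood pvTagsC := by
  unfold pvGood pvTagsC pvTags
  decide

lemma pvFoldl_bridge (ts : List (String × String)) :
    ∀ (h : String),
      (ts.foldl (fun h p => PySem.Str.replace h p.1 p.2) h).toList =
        (ts.map (fun p => (p.1.toList, p.2.toList))).foldl
          (fun s q => PySem.Chars.replace s q.1 q.2) h.toList := by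
  induction ts with
  | nil => intro h; rfl
  | cons p ts ih =>
    intro h
    rw [List.foldl_cons, List.map_cons, List.foldl_cons, ih, PySem.Str.toList_replace]

-- ===== VERDICT (by name: the statement is the Claim_ definition above) =====
theorem add_inline_styles_py_spec : Claim_equal_add_inline_styles_py := by
  intro html _
  unfold Spec_add_inline_styles_py add_inline_styles_py add_inline_styles_py_alt
  rw [← String.toList_inj, String.toList_ofList, pvFoldl_bridge, pvRules_eq_tags]
  exact pvFoldl_eq pvTagsC pvGood_tags html.toList
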